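-- pv_equiv track=rewrite | github.com/Sainath2705/Retail_store_data_analysis | app/routes.py | column_match_score
-- ===== SOURCE A (Python) =====
-- def normalize_column_name(value):
--     return str(value).strip().lower().replace("-", " ").replace("_", " ")
--
-- def column_match_score(column_name, aliases):
--     normalized_column = normalize_column_name(column_name)
--     column_tokens = set(normalized_column.split())
--     best_score = 0
--
--     for alias in aliases:
--         normalized_alias = normalize_column_name(alias)
--         alias_tokens = set(normalized_alias.split())
--
--         if normalized_column == normalized_alias:
--             best_score = max(best_score, 4)
--         elif column_tokens and column_tokens == alias_tokens:
--             best_score = max(best_score, 3)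
--         elif normalized_alias in normalized_column or normalized_column in normalized_alias:
--             best_score = max(best_score, 2)
--         elif alias_tokens and alias_tokens.issubset(column_tokens):
--             best_score = max(best_score, 1)
--
--     return best_score
-- ===== SOURCE B (Python) =====
-- def normalize_column_name(value):
--     return str(value).strip().lower().replace("-", " ").replace("_", " ")
--
-- def column_match_score(column_name, aliases):
--     normalized_column = normalize_column_name(column_name)
--     column_tokens = set(normalized_column.split())
--     pairs = [(na, set(na.split())) for na in map(normalize_column_name, aliases)]
--     if any(normalized_column == na for na, _ in pairs):
--         return 4
--     if column_tokens and any(column_tokens == toks for _, toks in pairs):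
--         return 3
--     if any(na in normalized_column or normalized_column in na for na, _ in pairs):
--         return 2
--     if any(toks and toks <= column_tokens for _, toks in pairs):
--         return 1
--     return 0
-- ===== Notes on version B (the rewrite author's own statement) =====
-- stated objective: faster
-- what changed: A's single fold carrying a running max of a per-alias priority cascade is replaced by materializing the (normalized_alias, token_set) pairs once and answering with tier-ordered any() scans (exact match, then token-set equality, then substring, then token subset), which short-circuit at the first hit.
import Mathlib
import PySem

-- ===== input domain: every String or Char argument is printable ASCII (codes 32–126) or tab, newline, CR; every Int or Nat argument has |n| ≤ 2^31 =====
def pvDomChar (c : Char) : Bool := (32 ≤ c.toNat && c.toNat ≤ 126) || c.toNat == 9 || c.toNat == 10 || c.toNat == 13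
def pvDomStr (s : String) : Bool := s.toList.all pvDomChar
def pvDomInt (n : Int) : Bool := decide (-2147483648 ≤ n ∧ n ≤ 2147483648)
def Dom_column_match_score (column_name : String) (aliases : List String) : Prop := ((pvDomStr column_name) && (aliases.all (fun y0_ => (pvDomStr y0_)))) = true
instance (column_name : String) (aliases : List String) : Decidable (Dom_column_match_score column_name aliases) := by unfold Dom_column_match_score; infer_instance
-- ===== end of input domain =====

-- B replaces A's single pass (per-alias priority cascade folded with max) by tier-ordered any() scans
-- over a once-materialized (normalized_alias, token_set) list: an alternative pass shape, same results.


-- ===== PORT A =====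
-- normalize_column_name (shared helper of both Pythons; 'value' is already a str here, so str(value) is value)
def normalize_column_name (value : String) : String :=
  PySem.Str.replace (PySem.Str.replace (PySem.Str.lower (PySem.Str.strip value)) "-" " ") "_" " "

def column_match_score (column_name : String) (aliases : List String) : Int :=
  let normalized_column := normalize_column_name column_name
  let column_tokens : PySem.Set String := PySem.Set.ofList (PySem.Str.split₀ normalized_column)
  aliases.foldl (fun best_score al_ =>
    if normalized_column == normalize_column_name al_ then max best_score 4
    else if (!column_tokens.isEmpty) && PySem.Set.equal column_tokens (PySem.Set.ofList (PySem.Str.split₀ (normalize_column_name al_))) then max best_score 3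
    else if PySem.Str.isIn (normalize_column_name al_) normalized_column || PySem.Str.isIn normalized_column (normalize_column_name al_) then max best_score 2
    else if (!(PySem.Set.ofList (PySem.Str.split₀ (normalize_column_name al_))).isEmpty) && PySem.Set.issubset (PySem.Set.ofList (PySem.Str.split₀ (normalize_column_name al_))) column_tokens then max best_score 1
    else best_score) 0

-- ===== PORT B =====
def column_match_score_alt (column_name : String) (aliases : List String) : Int :=
  let normalized_column := normalize_column_name column_name
  let column_tokens : PySem.Set String := PySem.Set.ofList (PySem.Str.split₀ normalized_column)
  let pairs : List (String × PySem.Set String) :=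
    (aliases.map normalize_column_name).map (fun na => (na, PySem.Set.ofList (PySem.Str.split₀ na)))
  if pairs.any (fun p => normalized_column == p.1) then 4
  else if (!column_tokens.isEmpty) && pairs.any (fun p => PySem.Set.equal column_tokens p.2) then 3
  else if pairs.any (fun p => PySem.Str.isIn p.1 normalized_column || PySem.Str.isIn normalized_column p.1) then 2
  else if pairs.any (fun p => (!p.2.isEmpty) && PySem.Set.issubset p.2 column_tokens) then 1
  else 0

-- ===== PRECONDITION & SPEC =====
def Spec_column_match_score (column_name : String) (aliases : List String) (out : Int) : Prop := out = column_match_score_alt column_name aliases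
instance (column_name : String) (aliases : List String) (out : Int) : Decidable (Spec_column_match_score column_name aliases out) := by unfold Spec_column_match_score; infer_instance

-- ===== CLAIM (what is proved, stated in full; the proofs are below) =====
def Claim_equal_column_match_score : Prop := ∀ (column_name : String) (aliases : List String), Dom_column_match_score column_name aliases → Spec_column_match_score column_name aliases (column_match_score column_name aliases)

-- ===== LEMMAS AND PROOFS =====

-- per-alias score of A's cascade, used only by the proofs
def pvScore (nc : String) (ct : PySem.Set String) (a : String) : Int :=
  if nc == normalize_column_name a then 4
  else if (!ct.isEmpty) && PySem.Set.equal ct (PySem.Set.ofList (PySem.Str.split₀ (normalize_column_name a))) then 3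
  else if PySem.Str.isIn (normalize_column_name a) nc || PySem.Str.isIn nc (normalize_column_name a) then 2
  else if (!(PySem.Set.ofList (PySem.Str.split₀ (normalize_column_name a))).isEmpty) && PySem.Set.issubset (PySem.Set.ofList (PySem.Str.split₀ (normalize_column_name a))) ct then 1
  else 0

lemma pvScore_cases (nc : String) (ct : PySem.Set String) (a : String) :
    pvScore nc ct a = 0 ∨ pvScore nc ct a = 1 ∨ pvScore nc ct a = 2 ∨ pvScore nc ct a = 3 ∨ pvScore nc ct a = 4 := by
  simp only [pvScore]
  split_ifs <;> simp

lemma le_foldl_max_self (f : String → Int) : ∀ (l : List String) (b : Int),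
    b ≤ l.foldl (fun b a => max b (f a)) b
  | [], _ => le_rfl
  | x :: xs, b => le_trans (le_max_left _ _) (le_foldl_max_self f xs (max b (f x)))

lemma mem_le_foldl_max (f : String → Int) : ∀ (l : List String) (b : Int) (a : String), a ∈ l →
    f a ≤ l.foldl (fun b a => max b (f a)) b
  | x :: xs, b, a, ha => by
    rcases List.mem_cons.1 ha with rfl | ha
    · exact le_trans (le_max_right _ _) (le_foldl_max_self f _ _)
    · exact mem_le_foldl_max f xs _ a ha

lemma foldl_max_le (f : String → Int) (k : Int) : ∀ (l : List String) (b : Int), b ≤ k →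
    (∀ a ∈ l, f a ≤ k) → l.foldl (fun b a => max b (f a)) b ≤ k
  | [], _, hb, _ => hb
  | x :: xs, b, hb, h =>
    foldl_max_le f k xs _ (max_le hb (h x List.mem_cons_self))
      (fun a ha => h a (List.mem_cons_of_mem _ ha))

lemma foldl_max_classify (f : String → Int) (l : List String)
    (h : ∀ a ∈ l, f a = 0 ∨ f a = 1 ∨ f a = 2 ∨ f a = 3 ∨ f a = 4) :
    l.foldl (fun b a => max b (f a)) 0 =
      if l.any (fun a => f a == 4) then 4
      else if l.any (fun a => f a == 3) then 3
      else if l.any (fun a => f a == 2) then 2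
      else if l.any (fun a => f a == 1) then 1 else 0 := by
  split_ifs with h4 h3 h2 h1
  · simp only [List.any_eq_true, beq_iff_eq] at h4
    obtain ⟨a, ha, hfa⟩ := h4
    have h1 := mem_le_foldl_max f l 0 a ha
    have h2 := foldl_max_le f 4 l 0 (by omega) (fun a ha => by rcases h a ha with h|h|h|h|h <;> omega)
    omega
  · simp only [List.any_eq_true, beq_iff_eq, not_exists, not_and] at h4 h3
    obtain ⟨a, ha, hfa⟩ := h3
    have hle := mem_le_foldl_max f l 0 a ha
    have hge := foldl_max_le f 3 l 0 (by omega)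
      (fun a ha => by have := h4 a ha; rcases h a ha with h|h|h|h|h <;> omega)
    omega
  · simp only [List.any_eq_true, beq_iff_eq, not_exists, not_and] at h4 h3 h2
    obtain ⟨a, ha, hfa⟩ := h2
    have hle := mem_le_foldl_max f l 0 a ha
    have hge := foldl_max_le f 2 l 0 (by omega)
      (fun a ha => by have := h4 a ha; have := h3 a ha; rcases h a ha with h|h|h|h|h <;> omega)
    omega
  · simp only [List.any_eq_true, beq_iff_eq, not_exists, not_and] at h4 h3 h2 h1
    obtain ⟨a, ha, hfa⟩ := h1
    have hle := mem_le_foldl_max f l 0 a ha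
    have hge := foldl_max_le f 1 l 0 (by omega)
      (fun a ha => by have := h4 a ha; have := h3 a ha; have := h2 a ha; rcases h a ha with h|h|h|h|h <;> omega)
    omega
  · simp only [List.any_eq_true, beq_iff_eq, not_exists, not_and] at h4 h3 h2 h1
    have hle := foldl_max_le f 0 l 0 le_rfl
      (fun a ha => by have := h4 a ha; have := h3 a ha; have := h2 a ha; have := h1 a ha; rcases h a ha with h|h|h|h|h <;> omega)
    have hge := le_foldl_max_self f l 0
    omega

-- one step of A's fold is max with the per-alias score
lemma pvStepA (nc : String) (ct : PySem.Set String) (x : String) (b : Int) (hb : 0 ≤ b) :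
    (if nc == normalize_column_name x then max b 4
        else if (!ct.isEmpty) && PySem.Set.equal ct (PySem.Set.ofList (PySem.Str.split₀ (normalize_column_name x))) then max b 3
        else if PySem.Str.isIn (normalize_column_name x) nc || PySem.Str.isIn nc (normalize_column_name x) then max b 2
        else if (!(PySem.Set.ofList (PySem.Str.split₀ (normalize_column_name x))).isEmpty) && PySem.Set.issubset (PySem.Set.ofList (PySem.Str.split₀ (normalize_column_name x))) ct then max b 1
        else b) = max b (pvScore nc ct x) := by
  simp only [pvScore]
  split_ifs <;> omega

-- A's fold equals the fold of max of per-alias scores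
lemma foldA_eq_foldScore (nc : String) (ct : PySem.Set String) : ∀ (l : List String) (b : Int), 0 ≤ b →
    l.foldl (fun best_score al_ =>
      if nc == normalize_column_name al_ then max best_score 4
      else if (!ct.isEmpty) && PySem.Set.equal ct (PySem.Set.ofList (PySem.Str.split₀ (normalize_column_name al_))) then max best_score 3
      else if PySem.Str.isIn (normalize_column_name al_) nc || PySem.Str.isIn nc (normalize_column_name al_) then max best_score 2
      else if (!(PySem.Set.ofList (PySem.Str.split₀ (normalize_column_name al_))).isEmpty) && PySem.Set.issubset (PySem.Set.ofList (PySem.Str.split₀ (normalize_column_name al_))) ct then max best_score 1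
      else best_score) b
    = l.foldl (fun b a => max b (pvScore nc ct a)) b
  | [], b, _ => by rw [List.foldl_nil, List.foldl_nil]
  | x :: xs, b, hb => by
    rw [List.foldl_cons, List.foldl_cons, pvStepA nc ct x b hb]
    exact foldA_eq_foldScore nc ct xs _ (le_trans hb (le_max_left _ _))

-- Bool plumbing
lemma pvAnyCongrMem {α : Type} (l : List α) (p q : α → Bool) (h : ∀ a ∈ l, p a = q a) :
    l.any p = l.any q := by
  induction l with
  | nil => rfl
  | cons x xs ih =>
    rw [List.any_cons, List.any_cons, h x List.mem_cons_self,
        ih (fun a ha => h a (List.mem_cons_of_mem _ ha))]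

lemma pvAnyAndLeft {α : Type} (c : Bool) (p : α → Bool) (l : List α) :
    l.any (fun a => c && p a) = (c && l.any p) := by
  cases c <;> simp

lemma pvAndAnyFalse {α : Type} (c : Bool) (p : α → Bool) (l : List α)
    (h : (c && l.any p) = false) : ∀ a ∈ l, (c && p a) = false := by
  cases c <;> simp_all [List.any_eq_false]

-- pointwise characterisations of pvScore's tiers
lemma pvScore4 (nc : String) (ct : PySem.Set String) (a : String) :
    (pvScore nc ct a == 4) = (nc == normalize_column_name a) := by
  simp only [pvScore]
  split_ifs with h1 h2 h3 h4 <;> simp [h1]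

lemma pvScore3 (nc : String) (ct : PySem.Set String) (a : String)
    (h : (nc == normalize_column_name a) = false) :
    (pvScore nc ct a == 3) =
      ((!ct.isEmpty) && PySem.Set.equal ct (PySem.Set.ofList (PySem.Str.split₀ (normalize_column_name a)))) := by
  simp only [pvScore, h, Bool.false_eq_true, if_false]
  split_ifs with h2 h3 h4 <;> simp [h2]

lemma pvScore2 (nc : String) (ct : PySem.Set String) (a : String)
    (h : (nc == normalize_column_name a) = false)
    (h3 : ((!ct.isEmpty) && PySem.Set.equal ct (PySem.Set.ofList (PySem.Str.split₀ (normalize_column_name a)))) = false) :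
    (pvScore nc ct a == 2) =
      (PySem.Str.isIn (normalize_column_name a) nc || PySem.Str.isIn nc (normalize_column_name a)) := by
  simp only [pvScore, h, h3, Bool.false_eq_true, if_false]
  split_ifs with h2 h4
  · rw [h2]; decide
  · rw [Bool.eq_false_iff.2 h2]; decide
  · rw [Bool.eq_false_iff.2 h2]; decide

lemma pvScore1 (nc : String) (ct : PySem.Set String) (a : String)
    (h : (nc == normalize_column_name a) = false)
    (h3 : ((!ct.isEmpty) && PySem.Set.equal ct (PySem.Set.ofList (PySem.Str.split₀ (normalize_column_name a)))) = false)
    (h2 : (PySem.Str.isIn (normalize_column_name a) nc || PySem.Str.isIn nc (normalize_column_name a)) = false) :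
    (pvScore nc ct a == 1) =
      ((!(PySem.Set.ofList (PySem.Str.split₀ (normalize_column_name a))).isEmpty) &&
        PySem.Set.issubset (PySem.Set.ofList (PySem.Str.split₀ (normalize_column_name a))) ct) := by
  simp only [pvScore, h, h3, h2, Bool.false_eq_true, if_false]
  split_ifs with h1
  · rw [h1]; decide
  · rw [Bool.eq_false_iff.2 h1]; decide

-- the score-based cascade equals B's tier scans over the materialized pairs
lemma classify_eq_alt (nc : String) (ct : PySem.Set String) (l : List String) :
    (if l.any (fun a => pvScore nc ct a == 4) then (4 : Int)
      else if l.any (fun a => pvScore nc ct a == 3) then 3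
      else if l.any (fun a => pvScore nc ct a == 2) then 2
      else if l.any (fun a => pvScore nc ct a == 1) then 1 else 0)
    =
    (if ((l.map normalize_column_name).map (fun na => (na, PySem.Set.ofList (PySem.Str.split₀ na)))).any (fun p => nc == p.1) then (4 : Int)
      else if (!ct.isEmpty) && ((l.map normalize_column_name).map (fun na => (na, PySem.Set.ofList (PySem.Str.split₀ na)))).any (fun p => PySem.Set.equal ct p.2) then 3
      else if ((l.map normalize_column_name).map (fun na => (na, PySem.Set.ofList (PySem.Str.split₀ na)))).any (fun p => PySem.Str.isIn p.1 nc || PySem.Str.isIn nc p.1) then 2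
      else if ((l.map normalize_column_name).map (fun na => (na, PySem.Set.ofList (PySem.Str.split₀ na)))).any (fun p => (!p.2.isEmpty) && PySem.Set.issubset p.2 ct) then 1
      else 0) := by
  simp only [List.any_map, Function.comp_def]
  rw [pvAnyCongrMem l _ _ (fun a _ => pvScore4 nc ct a)]
  by_cases hc4 : l.any (fun a => nc == normalize_column_name a) = true
  · rw [if_pos hc4, if_pos hc4]
  · have hall4 : ∀ a ∈ l, (nc == normalize_column_name a) = false :=
      fun a ha => Bool.eq_false_iff.2 (fun hh => hc4 (List.any_eq_true.2 ⟨a, ha, hh⟩))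
    rw [if_neg hc4, if_neg hc4,
        pvAnyCongrMem l _ _ (fun a ha => pvScore3 nc ct a (hall4 a ha)),
        pvAnyAndLeft]
    by_cases hc3 : ((!ct.isEmpty) && l.any (fun a => PySem.Set.equal ct (PySem.Set.ofList (PySem.Str.split₀ (normalize_column_name a))))) = true
    · rw [if_pos hc3, if_pos hc3]
    · have hall3 := pvAndAnyFalse (!ct.isEmpty) _ l (Bool.eq_false_iff.2 hc3)
      rw [if_neg hc3, if_neg hc3,
          pvAnyCongrMem l _ _ (fun a ha => pvScore2 nc ct a (hall4 a ha) (hall3 a ha))]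
      by_cases hc2 : l.any (fun a => PySem.Str.isIn (normalize_column_name a) nc || PySem.Str.isIn nc (normalize_column_name a)) = true
      · rw [if_pos hc2, if_pos hc2]
      · have hall2 : ∀ a ∈ l, (PySem.Str.isIn (normalize_column_name a) nc || PySem.Str.isIn nc (normalize_column_name a)) = false := by
          intro a ha
          exact Bool.eq_false_iff.2 (fun hh => hc2 (List.any_eq_true.2 ⟨a, ha, hh⟩))
        rw [if_neg hc2, if_neg hc2,
            pvAnyCongrMem l _ _ (fun a ha => pvScore1 nc ct a (hall4 a ha) (hall3 a ha) (hall2 a ha))]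

theorem column_match_score_spec : Claim_equal_column_match_score := by
  intro column_name aliases _
  unfold Spec_column_match_score
  simp only [column_match_score, column_match_score_alt]
  rw [foldA_eq_foldScore (normalize_column_name column_name)
        (PySem.Set.ofList (PySem.Str.split₀ (normalize_column_name column_name))) aliases 0 le_rfl,
      foldl_max_classify _ aliases (fun a _ => pvScore_cases _ _ a)]
  exact classify_eq_alt (normalize_column_name column_name)
    (PySem.Set.ofList (PySem.Str.split₀ (normalize_column_name column_name))) aliases
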